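-- pv_equiv track=rewrite | github.com/BIOIN401/Project14-T2PW | src/pipeline.py | _scan_json_prefix
-- ===== SOURCE A (Python) =====
-- from typing import Any, Callable, Dict, List, Optional, Tuple
--
-- def _scan_json_prefix(text: str) -> Tuple[bool, List[str], int]:
--     """
--     Scan JSON-like text and return:
--     (in_string, open_stack, last_safe_index_outside_string)
--     """
--     stack: List[str] = []
--     in_string = False
--     escape = False
--     last_safe = -1
--
--     for i, ch in enumerate(text):
--         if in_string:
--             if escape:
--                 escape = False
--             elif ch == "\\":
--                 escape = True
--             elif ch == '"':
--                 in_string = False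
--             continue
--
--         if ch == '"':
--             in_string = True
--             continue
--
--         if ch in "{[":
--             stack.append(ch)
--             last_safe = i
--         elif ch in "}]":
--             if stack:
--                 top = stack[-1]
--                 if (top == "{" and ch == "}") or (top == "[" and ch == "]"):
--                     stack.pop()
--             last_safe = i
--         elif not ch.isspace():
--             last_safe = i
--
--     return in_string, stack, last_safe
-- ===== SOURCE B (Python) =====
-- def _scan_json_prefix(text):
--     stack = []
--     last_safe = -1
--     n = len(text)
--     i = 0
--     while i < n:
--         c = text[i]
--         if c == '"':
--             j = i + 1
--             while j < n and text[j] != '"':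
--                 j += 2 if text[j] == "\\" else 1
--             if j >= n:
--                 return True, stack, last_safe
--             i = j
--         elif c in "{[":
--             stack.append(c)
--             last_safe = i
--         elif c in "}]":
--             if stack and ((stack[-1] == "{" and c == "}") or (stack[-1] == "[" and c == "]")):
--                 stack.pop()
--             last_safe = i
--         elif not c.isspace():
--             last_safe = i
--         i += 1
--     return False, stack, last_safe
-- ===== Notes on version B (the rewrite author's own statement) =====
-- stated objective: alternative
-- what changed: Replaces A's single pass with in_string/escape boolean state flags by an index-based outer loop that, on a quote, runs an inner loop consuming the whole string literal at once (skipping two positions after a backslash) and returns early on an unterminated literal.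
import Mathlib
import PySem

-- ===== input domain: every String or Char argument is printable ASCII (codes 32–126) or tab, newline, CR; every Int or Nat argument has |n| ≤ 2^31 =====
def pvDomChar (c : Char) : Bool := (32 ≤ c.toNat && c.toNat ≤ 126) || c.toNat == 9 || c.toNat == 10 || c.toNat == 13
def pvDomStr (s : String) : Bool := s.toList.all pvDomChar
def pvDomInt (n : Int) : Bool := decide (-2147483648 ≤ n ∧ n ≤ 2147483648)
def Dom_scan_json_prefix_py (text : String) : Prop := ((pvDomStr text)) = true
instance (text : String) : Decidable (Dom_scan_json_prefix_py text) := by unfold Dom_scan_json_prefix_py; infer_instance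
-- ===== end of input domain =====

-- B replaces A's in_string/escape flag machinery by an index-based scan with an inner
-- loop that skips each whole string literal at once (same cost, simpler state).

-- ===== PORT A =====
-- enumerate(text)
def pvEnumFrom (k : Int) : List Char → List (Int × Char)
  | [] => []
  | c :: cs => (k, c) :: pvEnumFrom (k + 1) cs

-- the for-loop of A over (index, char) pairs, state (stack, in_string, escape, last_safe)
def pvALoop : List (Int × Char) → List String → Bool → Bool → Int → Bool × List String × Int
  | [], stack, instr, _esc, last => (instr, stack, last)
  | (i, ch) :: rest, stack, instr, esc, last =>
    if instr then
      if esc then pvALoop rest stack instr false last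
      else if ch = '\\' then pvALoop rest stack instr true last
      else if ch = '"' then pvALoop rest stack false esc last
      else pvALoop rest stack instr esc last
    else if ch = '"' then pvALoop rest stack true esc last
    else if ch = '{' ∨ ch = '[' then pvALoop rest (stack ++ [String.ofList [ch]]) instr esc i
    else if ch = '}' ∨ ch = ']' then
      let stack' :=
        if stack.isEmpty then stack
        else
          let top := stack.getLast?.getD ""
          if (top = "{" ∧ ch = '}') ∨ (top = "[" ∧ ch = ']') then stack.dropLast else stack
      pvALoop rest stack' instr esc i
    else if PySem.Chars.isspace ch = false then pvALoop rest stack instr esc i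
    else pvALoop rest stack instr esc last

def scan_json_prefix_py (text : String) : Bool × List String × Int :=
  pvALoop (pvEnumFrom 0 text.toList) [] false false (-1)

-- ===== PORT B =====
-- B's inner while loop: advance j through a string literal (skip 2 after a backslash),
-- stopping at the closing quote or at/after the end.  The fuel argument only makes the
-- recursion structural; it is started at n and never runs out before the loop stops.
def pvBInner (s : List Char) (n : Nat) : Nat → Nat → Nat
  | 0, j => j
  | fuel + 1, j =>
    if j < n ∧ s.getD j ' ' ≠ '"' then
      pvBInner s n fuel (j + (if s.getD j ' ' = '\\' then 2 else 1))
    else j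

-- B's outer while loop (fuel likewise only for structural recursion)
def pvBLoop (s : List Char) (n : Nat) : Nat → Nat → List String → Int → Bool × List String × Int
  | 0, _, stack, last => (false, stack, last)
  | fuel + 1, i, stack, last =>
    if i < n then
      let c := s.getD i ' '
      if c = '"' then
        let j := pvBInner s n fuel (i + 1)
        if n ≤ j then (true, stack, last)
        else pvBLoop s n fuel (j + 1) stack last
      else if c = '{' ∨ c = '[' then pvBLoop s n fuel (i + 1) (stack ++ [String.ofList [c]]) (i : Int)
      else if c = '}' ∨ c = ']' then
        let stack' :=
          if stack ≠ [] ∧ ((stack.getLast?.getD "" = "{" ∧ c = '}') ∨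
                           (stack.getLast?.getD "" = "[" ∧ c = ']'))
          then stack.dropLast else stack
        pvBLoop s n fuel (i + 1) stack' (i : Int)
      else if PySem.Chars.isspace c = false then pvBLoop s n fuel (i + 1) stack (i : Int)
      else pvBLoop s n fuel (i + 1) stack last
    else (false, stack, last)

def scan_json_prefix_py_alt (text : String) : Bool × List String × Int :=
  pvBLoop text.toList text.toList.length text.toList.length 0 [] (-1)

-- ===== PRECONDITION & SPEC =====
def Spec_scan_json_prefix_py (text : String) (out : Bool × List String × Int) : Prop := out = scan_json_prefix_py_alt text
instance (text : String) (out : Bool × List String × Int) : Decidable (Spec_scan_json_prefix_py text out) := by unfold Spec_scan_json_prefix_py; infer_instance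

-- ===== CLAIM (what is proved, stated in full; the proofs are below) =====
def Claim_equal_scan_json_prefix_py : Prop := ∀ (text : String), Dom_scan_json_prefix_py text → Spec_scan_json_prefix_py text (scan_json_prefix_py text)

-- ===== LEMMAS AND PROOFS =====

theorem pv_drop_eq (s : List Char) (i : Nat) (h : i < s.length) :
    s.drop i = s.getD i ' ' :: s.drop (i + 1) := by
  rw [List.getD_eq_getElem s ' ' h]
  exact (List.getElem_cons_drop h).symm

-- the two ways of writing the conditional pop are the same stack
theorem pv_stack_eq (stack : List String) (c : Char) :
    (if stack.isEmpty then stack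
     else if (stack.getLast?.getD "" = "{" ∧ c = '}') ∨ (stack.getLast?.getD "" = "[" ∧ c = ']')
          then stack.dropLast else stack)
    = (if stack ≠ [] ∧ ((stack.getLast?.getD "" = "{" ∧ c = '}') ∨
                        (stack.getLast?.getD "" = "[" ∧ c = ']'))
       then stack.dropLast else stack) := by
  cases stack with
  | nil => simp
  | cons a l => simp

theorem pv_cast_succ (i : Nat) : (i : Int) + 1 = ((i + 1 : Nat) : Int) := by push_cast; ring

-- the inner loop is the identity once its guard is false, whatever the fuel
theorem pvBInner_stop (s : List Char) (n j : Nat)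
    (h : ¬ (j < n ∧ s.getD j ' ' ≠ '"')) (f : Nat) : pvBInner s n f j = j := by
  cases f with
  | zero => rfl
  | succ f => rw [pvBInner, if_neg h]

-- the outer loop returns at once past the end, whatever the fuel
theorem pvBLoop_stop (s : List Char) (n i : Nat) (h : n ≤ i) (f : Nat)
    (stack : List String) (last : Int) : pvBLoop s n f i stack last = (false, stack, last) := by
  cases f with
  | zero => rfl
  | succ f => rw [pvBLoop, if_neg (by omega)]

-- the joint invariant: outside a string A's loop is B's outer loop,
-- inside a string A's loop is B's inner loop followed by the outer loop
-- (for any fuel at least the number of characters left)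
theorem pv_main (s : List Char) :
    ∀ k i, i ≤ s.length → s.length - i = k →
      (∀ f stack last, s.length - i ≤ f →
        pvALoop (pvEnumFrom (i : Int) (s.drop i)) stack false false last
          = pvBLoop s s.length f i stack last)
      ∧ (∀ f g stack last, s.length - i ≤ f → s.length - i ≤ g →
        pvALoop (pvEnumFrom (i : Int) (s.drop i)) stack true false last
          = if s.length ≤ pvBInner s s.length f i then (true, stack, last)
            else pvBLoop s s.length g (pvBInner s s.length f i + 1) stack last) := by
  intro k
  induction k using Nat.strong_induction_on with
  | _ k ih =>
    intro i hi hk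
    constructor
    · -- outside a string
      intro f stack last hf
      by_cases hlt : i < s.length
      · obtain ⟨f₁, rfl⟩ : ∃ f₁, f = f₁ + 1 := ⟨f - 1, by omega⟩
        rw [pv_drop_eq s i hlt, pvEnumFrom, pvALoop, pvBLoop, if_pos hlt]
        set c := s.getD i ' ' with hc
        simp only [Bool.false_eq_true, if_false]
        by_cases hq : c = '"'
        · rw [if_pos hq, if_pos hq, pv_cast_succ]
          exact (ih (s.length - (i+1)) (by omega) (i+1) (by omega) rfl).2 f₁ f₁ stack last
            (by omega) (by omega)
        · rw [if_neg hq, if_neg hq]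
          by_cases ho : c = '{' ∨ c = '['
          · rw [if_pos ho, if_pos ho, pv_cast_succ]
            exact (ih (s.length - (i+1)) (by omega) (i+1) (by omega) rfl).1 f₁ _ _ (by omega)
          · rw [if_neg ho, if_neg ho]
            by_cases hcl : c = '}' ∨ c = ']'
            · rw [if_pos hcl, if_pos hcl]
              rw [pv_stack_eq stack c, pv_cast_succ]
              exact (ih (s.length - (i+1)) (by omega) (i+1) (by omega) rfl).1 f₁ _ _ (by omega)
            · rw [if_neg hcl, if_neg hcl]
              by_cases hsp : PySem.Chars.isspace c = false
              · rw [if_pos hsp, if_pos hsp, pv_cast_succ]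
                exact (ih (s.length - (i+1)) (by omega) (i+1) (by omega) rfl).1 f₁ _ _ (by omega)
              · rw [if_neg hsp, if_neg hsp, pv_cast_succ]
                exact (ih (s.length - (i+1)) (by omega) (i+1) (by omega) rfl).1 f₁ _ _ (by omega)
      · rw [List.drop_eq_nil_of_le (by omega), pvEnumFrom, pvALoop,
            pvBLoop_stop s s.length i (by omega)]
    · -- inside a string
      intro f g stack last hf hg
      by_cases hlt : i < s.length
      · obtain ⟨f₁, rfl⟩ : ∃ f₁, f = f₁ + 1 := ⟨f - 1, by omega⟩
        rw [pv_drop_eq s i hlt, pvEnumFrom, pvALoop, pvBInner]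
        set c := s.getD i ' ' with hc
        simp only [if_true, Bool.false_eq_true, if_false]
        by_cases hq : c = '"'
        · -- closing quote: leave the string; B's inner loop stops at i
          rw [if_neg (show c ≠ '\\' by simp [hq]), if_pos hq,
              if_neg (show ¬ (i < s.length ∧ c ≠ '"') by simp [hq]),
              if_neg (show ¬ s.length ≤ i by omega), pv_cast_succ]
          exact (ih (s.length - (i+1)) (by omega) (i+1) (by omega) rfl).1 g stack last (by omega)
        · by_cases hb : c = '\\'
          · -- escape: A consumes the next character too; B's inner loop jumps by 2
            rw [if_pos hb, if_pos (show i < s.length ∧ c ≠ '"' from ⟨hlt, hq⟩), if_pos hb]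
            by_cases hlt2 : i + 1 < s.length
            · rw [pv_drop_eq s (i+1) hlt2, pvEnumFrom, pvALoop]
              simp only [if_true]
              have hcast : (i : Int) + 1 + 1 = ((i + 2 : Nat) : Int) := by push_cast; ring
              rw [hcast]
              exact (ih (s.length - (i+2)) (by omega) (i+2) (by omega) rfl).2 f₁ g stack last
                (by omega) (by omega)
            · rw [List.drop_eq_nil_of_le (by omega), pvEnumFrom, pvALoop,
                  pvBInner_stop s s.length (i+2) (by rintro ⟨h1, -⟩; omega),
                  if_pos (show s.length ≤ i + 2 by omega)]
          · -- ordinary character inside the string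
            rw [if_neg hb, if_neg hq, if_pos (show i < s.length ∧ c ≠ '"' from ⟨hlt, hq⟩),
                if_neg hb, pv_cast_succ]
            exact (ih (s.length - (i+1)) (by omega) (i+1) (by omega) rfl).2 f₁ g stack last
              (by omega) (by omega)
      · rw [List.drop_eq_nil_of_le (by omega), pvEnumFrom, pvALoop,
            pvBInner_stop s s.length i (by rintro ⟨h1, -⟩; omega),
            if_pos (show s.length ≤ i by omega)]

-- ===== VERDICT (by name: the statement is the Claim_ definition above) =====
theorem scan_json_prefix_py_spec : Claim_equal_scan_json_prefix_py := by
  intro text _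
  unfold Spec_scan_json_prefix_py scan_json_prefix_py scan_json_prefix_py_alt
  have h := (pv_main text.toList text.toList.length 0 (Nat.zero_le _) rfl).1
    text.toList.length [] (-1) (by omega)
  simpa using h
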